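-- pv_equiv track=rewrite | github.com/gallottino/advent-of-code-challanges | 2024/day_09/main.py | get_files_map
-- ===== SOURCE A (Python) =====
-- def get_files_map(block_files: list[str]) -> dict[str, int]:
--     map = {}
--     for index, file in enumerate(block_files):
--         if file != ".":
--             if file not in map:
--                 map[file] = [index, 0]
--             [fileIdx, size] = map[file]
--             map[file] = [fileIdx, size + 1]
--     return map
-- ===== SOURCE B (Python) =====
-- def get_files_map(block_files: list[str]) -> dict[str, int]:
--     # distinct non-'.' files in first-occurrence order, then per-file
--     # whole-list index/count scans (no incremental [start,size] state)
--     files = []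
--     for f in block_files:
--         if f != "." and f not in files:
--             files.append(f)
--     return {f: [block_files.index(f), block_files.count(f)] for f in files}
-- ===== Notes on version B (the rewrite author's own statement) =====
-- stated objective: alternative
-- what changed: B keeps no per-file running state: it first collects the distinct non-'.' files in first-occurrence order, then answers each file with independent whole-list index() and count() scans, instead of A's single pass that builds and read-modify-writes [start,size] pairs in a dict.
import Mathlib
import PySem

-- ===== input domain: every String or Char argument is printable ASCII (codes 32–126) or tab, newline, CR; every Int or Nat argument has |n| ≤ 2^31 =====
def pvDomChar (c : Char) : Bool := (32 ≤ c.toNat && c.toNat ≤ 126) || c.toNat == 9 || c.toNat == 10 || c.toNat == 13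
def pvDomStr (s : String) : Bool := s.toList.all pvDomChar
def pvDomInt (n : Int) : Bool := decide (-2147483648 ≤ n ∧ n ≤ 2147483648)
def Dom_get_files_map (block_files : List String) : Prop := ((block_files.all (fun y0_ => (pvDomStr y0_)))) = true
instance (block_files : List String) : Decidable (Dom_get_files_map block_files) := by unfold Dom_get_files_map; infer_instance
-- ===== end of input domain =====

-- B drops A's incremental dict of [start, size] pairs: it lists the distinct non-'.'
-- files first and answers each with independent whole-list index/count scans (not faster).

-- ===== PORT A =====
-- one loop step of A: the body of 'for index, file in enumerate(block_files)'
def pvAStep (m : PySem.Dict String (List Int)) (p : Int × String) : PySem.Dict String (List Int) :=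
  if p.2 ≠ "." then
    let m1 := if m.contains p.2 then m else m.insert p.2 [p.1, 0]
    match m1.getD p.2 [] with            -- [fileIdx, size] = map[file]  (always a 2-list here)
    | [fileIdx, size] => m1.insert p.2 [fileIdx, size + 1]
    | _ => m1
  else m

def get_files_map (block_files : List String) : List (String × List Int) :=
  ((PySem.List.enumerate block_files).foldl pvAStep PySem.Dict.empty).items

-- ===== PORT B =====
-- files = []; for f in block_files: if f != "." and f not in files: files.append(f)
-- then {f: [block_files.index(f), block_files.count(f)] for f in files};
-- f ∈ block_files for every f in files, so .index never raises (getD's default is unreachable)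
def get_files_map_alt (block_files : List String) : List (String × List Int) :=
  let files := block_files.foldl (fun acc f => if f ≠ "." ∧ f ∉ acc then acc ++ [f] else acc) []
  files.map (fun f =>
    (f, [(((PySem.List.index? block_files f).getD 0 : Nat) : Int), (block_files.count f : Int)]))

-- ===== PRECONDITION & SPEC =====
def Spec_get_files_map (block_files : List String) (out : List (String × List Int)) : Prop := out = get_files_map_alt block_files
instance (block_files : List String) (out : List (String × List Int)) : Decidable (Spec_get_files_map block_files out) := by unfold Spec_get_files_map; infer_instance

-- ===== CLAIM (what is proved, stated in full; the proofs are below) =====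
def Claim_equal_get_files_map : Prop := ∀ (block_files : List String), Dom_get_files_map block_files → Spec_get_files_map block_files (get_files_map block_files)

-- ===== LEMMAS AND PROOFS =====

-- the NEW distinct non-'.' files of xs given already-seen acc, in first-occurrence order
def pvNew (acc : List String) : List String → List String
  | [] => []
  | x :: rest => if x ≠ "." ∧ x ∉ acc then x :: pvNew (acc ++ [x]) rest else pvNew acc rest

theorem pv_mem_pvNew (acc xs : List String) (f : String) (h : f ∈ pvNew acc xs) :
    f ∉ acc ∧ f ≠ "." ∧ f ∈ xs := by
  induction xs generalizing acc with
  | nil => simp [pvNew] at h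
  | cons x rest ih =>
    by_cases hx : x ≠ "." ∧ x ∉ acc
    · rw [pvNew, if_pos hx, List.mem_cons] at h
      rcases h with h | h
      · subst h; exact ⟨hx.2, hx.1, by simp⟩
      · obtain ⟨h1, h2, h3⟩ := ih (acc ++ [x]) h
        exact ⟨fun hc => h1 (by simp [hc]), h2, by simp [h3]⟩
    · rw [pvNew, if_neg hx] at h
      obtain ⟨h1, h2, h3⟩ := ih acc h
      exact ⟨h1, h2, by simp [h3]⟩

theorem pv_files_eq (acc xs : List String) :
    xs.foldl (fun acc f => if f ≠ "." ∧ f ∉ acc then acc ++ [f] else acc) acc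
      = acc ++ pvNew acc xs := by
  induction xs generalizing acc with
  | nil => simp [pvNew]
  | cons x rest ih =>
    rw [List.foldl_cons, pvNew]
    by_cases hx : x ≠ "." ∧ x ∉ acc
    · rw [if_pos hx, if_pos hx, ih]; simp
    · rw [if_neg hx, if_neg hx, ih]

-- index of f shifted by a leading element ≠ f
theorem pv_idx_cons (x f : String) (rest : List String) (hne : f ≠ x) (hmem : f ∈ rest) :
    (((PySem.List.index? (x :: rest) f).getD 0 : Nat) : Int)
      = 1 + (((PySem.List.index? rest f).getD 0 : Nat) : Int) := by
  obtain ⟨k, hk⟩ := Option.isSome_iff_exists.mp ((PySem.List.index?_isSome_iff rest f).mpr hmem)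
  rw [PySem.List.index?_cons_of_ne rest (fun h => hne h.symm), hk]
  simp; omega

-- one step of A on a key already in the dict: items are updated in place
theorem pv_step_contains (dA : PySem.Dict String (List Int)) (a fi s : Int) (x : String)
    (hnd : dA.keys.Nodup) (hx : x ≠ ".") (hmem : (x, [fi, s]) ∈ dA.items) :
    pvAStep dA (a, x) = dA.insert x [fi, s + 1] := by
  have hc : dA.contains x = true := by
    rw [PySem.Dict.contains_eq_decide_mem_keys]
    exact decide_eq_true (PySem.Dict.mem_keys_of_mem_items dA hmem)
  have hg : dA.getD x [] = [fi, s] := PySem.Dict.getD_of_mem_items dA hmem hnd []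
  simp only [pvAStep, if_pos hx, hc, if_true, hg]

-- one step of A on a fresh key: the pair (x, [a, 1]) is appended
theorem pv_step_fresh (dA : PySem.Dict String (List Int)) (a : Int) (x : String)
    (hx : x ≠ ".") (hc : dA.contains x = false) :
    pvAStep dA (a, x) = dA.insert x [a, 0 + 1] := by
  simp only [pvAStep, if_pos hx, hc, Bool.false_eq_true, if_false,
    PySem.Dict.getD_insert_self, PySem.Dict.insert_insert_self]

-- full characterization of A's loop from an arbitrary dict state
theorem pv_fold_char (xs : List String) (a : Int) (dA : PySem.Dict String (List Int))
    (hnd : dA.keys.Nodup) (hdot : "." ∉ dA.keys)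
    (h2 : ∀ p ∈ dA.items, ∃ fi s, p.2 = [fi, s]) :
    ((PySem.List.enumerate xs a).foldl pvAStep dA).items
      = dA.items.map (fun p => (p.1, [p.2.headD 0, p.2.tail.headD 0 + (xs.count p.1 : Int)]))
        ++ (pvNew dA.keys xs).map (fun f =>
             (f, [a + (((PySem.List.index? xs f).getD 0 : Nat) : Int), (xs.count f : Int)])) := by
  induction xs generalizing a dA with
  | nil =>
    rw [PySem.List.enumerate_nil, List.foldl_nil, pvNew]
    rw [List.map_nil, List.append_nil]
    refine Eq.symm ((List.map_congr_left fun p hp => ?_).trans (List.map_id _))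
    obtain ⟨k, v⟩ := p
    obtain ⟨fi, s, hv⟩ := h2 (k, v) hp
    have hv' : v = [fi, s] := hv
    subst hv'
    simp
  | cons x rest ih =>
    rw [PySem.List.enumerate_cons, List.foldl_cons]
    by_cases hx : x = "."
    · -- '.' is skipped by A and by pvNew; every key and new file differs from '.'
      subst hx
      have hstep : pvAStep dA (a, ".") = dA := by simp [pvAStep]
      rw [hstep, ih (a + 1) dA hnd hdot h2, pvNew]
      simp only [ne_eq, not_true_eq_false, false_and, if_false]
      congr 1
      · refine List.map_congr_left (fun p hp => ?_)
        have hpk : p.1 ≠ "." := fun h => hdot (h ▸ PySem.Dict.mem_keys_of_mem_items dA hp)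
        rw [List.count_cons_of_ne (by intro h; first | exact hpk h | exact hpk h.symm)]
      · refine List.map_congr_left (fun f hf => ?_)
        obtain ⟨_, hf2, hf3⟩ := pv_mem_pvNew dA.keys rest f hf
        rw [List.count_cons_of_ne (by intro h; first | exact hf2 h | exact hf2 h.symm),
          pv_idx_cons "." f rest hf2 hf3]
        simp only [Prod.mk.injEq, List.cons.injEq, true_and, and_true]
        ring
    · by_cases hk : x ∈ dA.keys
      · -- existing key: A bumps its size in place, pvNew ignores x
        have hc : dA.contains x = true := by
          rw [PySem.Dict.contains_eq_decide_mem_keys]; exact decide_eq_true hk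
        obtain ⟨v, hv⟩ : ∃ v, dA.get? x = some v := by
          have h := PySem.Dict.contains_eq_isSome_get? dA x
          rw [hc] at h; exact Option.isSome_iff_exists.mp h.symm
        have hmem : (x, v) ∈ dA.items := PySem.Dict.mem_items_of_get?_eq_some dA hv
        obtain ⟨fi, s, hvs⟩ := h2 (x, v) hmem
        simp only at hvs; subst hvs
        rw [pv_step_contains dA a fi s x hnd hx hmem]
        have hitems' : (dA.insert x [fi, s + 1]).items
            = dA.items.map (fun p => if p.1 == x then (x, [fi, s + 1]) else p) :=
          PySem.Dict.items_insert_of_contains _ _ hc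
        have hkeys' : (dA.insert x [fi, s + 1]).keys = dA.keys := by
          show (dA.insert x [fi, s + 1]).items.map Prod.fst = dA.items.map Prod.fst
          rw [hitems', List.map_map]
          refine List.map_congr_left (fun p hp => ?_)
          by_cases hpx : p.1 = x <;> simp [hpx]
        rw [ih (a + 1) _ (hkeys' ▸ hnd) (hkeys' ▸ hdot) ?_, hitems', hkeys']
        · congr 1
          · rw [List.map_map]
            refine List.map_congr_left (fun p hp => ?_)
            by_cases hpx : p.1 = x
            · have hpv : p = (x, [fi, s]) := by
                have h1 : dA.get? x = some p.2 := by
                  have := PySem.Dict.get?_of_mem_items dA (k := p.1) (v := p.2) (by simpa using hp) hnd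
                  rwa [hpx] at this
                rw [hv] at h1
                exact Prod.ext hpx (Option.some.inj h1).symm
              subst hpv
              simp only [Function.comp_apply, BEq.rfl, if_true, List.headD, List.tail,
                List.count_cons_self, Prod.mk.injEq, List.cons.injEq, true_and, and_true]
              push_cast; ring
            · simp only [Function.comp_apply, beq_iff_eq, if_neg hpx,
                List.count_cons_of_ne (fun h => hpx h.symm)]
          · -- new files of rest avoid x, so their counts and indices shift uniformly
            have hnew : pvNew dA.keys (x :: rest) = pvNew dA.keys rest := by
              rw [pvNew, if_neg (by simp [hk])]
            rw [hnew]
            refine List.map_congr_left (fun f hf => ?_)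
            obtain ⟨hf1, _, hf3⟩ := pv_mem_pvNew dA.keys rest f hf
            have hfx : f ≠ x := fun h => hf1 (h ▸ hk)
            rw [List.count_cons_of_ne (fun h => hfx h.symm), pv_idx_cons x f rest hfx hf3]
            simp only [Prod.mk.injEq, List.cons.injEq, true_and, and_true]
            ring
        · intro p hp
          rw [hitems'] at hp
          obtain ⟨q, hq, hqe⟩ := List.mem_map.mp hp
          by_cases hqx : q.1 = x
          · exact ⟨fi, s + 1, by rw [← hqe]; simp [hqx]⟩
          · obtain ⟨fi', s', h⟩ := h2 q hq
            exact ⟨fi', s', by rw [← hqe]; simp [hqx, h]⟩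
      · -- fresh key: A appends (x, [a, 1]); pvNew lists x first
        have hc : dA.contains x = false := by
          rw [PySem.Dict.contains_eq_decide_mem_keys]; exact decide_eq_false hk
        rw [pv_step_fresh dA a x hx hc]
        have hitems' : (dA.insert x [a, 0 + 1]).items = dA.items ++ [(x, [a, 0 + 1])] :=
          PySem.Dict.items_insert_of_not_contains _ _ hc
        have hkeys' : (dA.insert x [a, 0 + 1]).keys = dA.keys ++ [x] := by
          rw [PySem.Dict.keys_insert_of_not_contains _ _ hc]
        have hnd' : (dA.insert x [a, 0 + 1]).keys.Nodup := by
          rw [hkeys', List.nodup_append]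
          refine ⟨hnd, List.nodup_singleton x, ?_⟩
          intro b hb c hc hbc
          rw [List.mem_singleton] at hc
          exact hk ((hbc.trans hc) ▸ hb)
        have hdot' : "." ∉ (dA.insert x [a, 0 + 1]).keys := by
          rw [hkeys']; simp only [List.mem_append, List.mem_singleton]
          exact fun h => h.elim hdot (fun h => hx h.symm)
        have h2' : ∀ p ∈ (dA.insert x [a, 0 + 1]).items, ∃ fi s, p.2 = [fi, s] := by
          intro p hp
          rw [hitems'] at hp
          rcases List.mem_append.mp hp with h | h
          · exact h2 p h
          · exact ⟨a, 0 + 1, by simp at h; simp [h]⟩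
        rw [ih (a + 1) _ hnd' hdot' h2', hitems', hkeys', List.map_append, List.append_assoc]
        have hnew : pvNew dA.keys (x :: rest) = x :: pvNew (dA.keys ++ [x]) rest := by
          rw [pvNew, if_pos ⟨hx, hk⟩]
        rw [hnew]
        congr 1
        · refine List.map_congr_left (fun p hp => ?_)
          have hpx : p.1 ≠ x := fun h => hk (h ▸ PySem.Dict.mem_keys_of_mem_items dA hp)
          rw [List.count_cons_of_ne (fun h => hpx h.symm)]
        · simp only [List.map_cons, List.map_nil, List.cons_append, List.nil_append]
          congr 1
          · rw [PySem.List.index?_cons_self, List.count_cons_self]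
            simp only [Option.getD_some, Nat.cast_zero, add_zero, List.headD, List.tail,
              Prod.mk.injEq, List.cons.injEq, true_and, and_true]
            push_cast
            omega
          · refine List.map_congr_left (fun f hf => ?_)
            obtain ⟨hf1, _, hf3⟩ := pv_mem_pvNew (dA.keys ++ [x]) rest f hf
            have hfx : f ≠ x := fun h => hf1 (by simp [h])
            rw [List.count_cons_of_ne (fun h => hfx h.symm), pv_idx_cons x f rest hfx hf3]
            simp only [Prod.mk.injEq, List.cons.injEq, true_and, and_true]
            ring

-- ===== VERDICT (by name: the statement is the Claim_ definition above) =====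
theorem get_files_map_spec : Claim_equal_get_files_map := by
  intro bf _
  show _ = _
  unfold get_files_map get_files_map_alt
  rw [pv_fold_char bf 0 PySem.Dict.empty (by simp) (by simp) (by intro p hp; simp [PySem.Dict.empty] at hp)]
  rw [pv_files_eq [] bf]
  simp only [PySem.Dict.empty, List.map_nil, List.nil_append, zero_add, PySem.Dict.keys]
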